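-- pv_equiv track=rewrite | github.com/lixiang2017/leetcode | contest/weekly-contest-291/6048.0_Minimum_Consecutive_Cards_to_Pick_Up.py | minimumCardPickup
-- ===== SOURCE A (Python) =====
-- from typing import List
--
-- def minimumCardPickup(cards: List[int]) -> int:
--     ans = -1
--     pos = dict()
--     for i, c in enumerate(cards):
--         if c in pos:
--             p = pos[c]
--             if ans == -1 or ans > i - p + 1:
--                 ans = i - p + 1
--         pos[c] = i
--
--     return ans
-- ===== SOURCE B (Python) =====
-- from typing import List
--
-- def minimumCardPickup(cards: List[int]) -> int:
--     # Phase 1: group all indices by card value.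
--     positions = {}
--     for i, c in enumerate(cards):
--         positions.setdefault(c, []).append(i)
--     # Phase 2: minimum gap between consecutive occurrences of any value.
--     best = None
--     for idxs in positions.values():
--         for a, b in zip(idxs, idxs[1:]):
--             d = b - a + 1
--             if best is None or d < best:
--                 best = d
--     return -1 if best is None else best
-- ===== Notes on version B (the rewrite author's own statement) =====
-- stated objective: alternative
-- what changed: B separates the computation into two phases - first build a dict mapping each value to its full list of occurrence indices, then scan each index list's consecutive differences for the global minimum - instead of A's single online pass that interleaves a last-seen dict with a running minimum.
import Mathlib
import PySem

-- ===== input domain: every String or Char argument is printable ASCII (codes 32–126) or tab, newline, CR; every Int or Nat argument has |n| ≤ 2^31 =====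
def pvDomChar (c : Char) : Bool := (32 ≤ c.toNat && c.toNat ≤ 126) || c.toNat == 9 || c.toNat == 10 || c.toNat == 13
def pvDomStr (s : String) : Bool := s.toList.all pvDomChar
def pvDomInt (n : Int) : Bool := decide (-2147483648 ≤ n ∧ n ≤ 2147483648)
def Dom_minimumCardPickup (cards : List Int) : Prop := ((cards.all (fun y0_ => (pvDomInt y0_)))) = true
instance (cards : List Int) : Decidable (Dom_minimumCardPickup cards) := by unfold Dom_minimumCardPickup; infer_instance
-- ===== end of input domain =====

-- B re-implements A in two phases (group every value's index list, then scan consecutive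
-- differences) instead of A's single online pass with a last-seen dict; same cost.

-- ===== PORT A =====
def minimumCardPickup (cards : List Int) : Int :=
  ((PySem.List.enumerate cards).foldl
    (fun st p =>
      let ans := st.1
      let pos := st.2
      let ans' :=
        match pos.get? p.2 with   -- `if c in pos: q = pos[c]` (lookup inside the membership guard)
        | some q => if ans = -1 ∨ ans > p.1 - q + 1 then p.1 - q + 1 else ans
        | none => ans
      (ans', pos.insert p.2 p.1))
    ((-1 : Int), (PySem.Dict.empty : PySem.Dict Int Int))).1

-- ===== PORT B =====
def minimumCardPickup_alt (cards : List Int) : Int :=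
  -- phase 1: positions.setdefault(c, []).append(i), i.e. positions[c] = positions.get(c, []) + [i]
  let positions : PySem.Dict Int (List Int) :=
    (PySem.List.enumerate cards).foldl (fun d p => d.modify p.2 [] (· ++ [p.1])) PySem.Dict.empty
  -- phase 2: minimum of consecutive-index differences + 1, over all value groups
  let best : Option Int :=
    positions.values.foldl
      (fun b idxs =>
        (idxs.zip (idxs.drop 1)).foldl   -- zip(idxs, idxs[1:])
          (fun b pr =>
            let d := pr.2 - pr.1 + 1
            match b with
            | none => some d
            | some bb => if d < bb then some d else some bb) b)
      none
  match best with
  | none => -1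
  | some b => b

-- ===== PRECONDITION & SPEC =====
def Spec_minimumCardPickup (cards : List Int) (out : Int) : Prop := out = minimumCardPickup_alt cards
instance (cards : List Int) (out : Int) : Decidable (Spec_minimumCardPickup cards out) := by unfold Spec_minimumCardPickup; infer_instance

-- ===== CLAIM (what is proved, stated in full; the proofs are below) =====
def Claim_equal_minimumCardPickup : Prop := ∀ (cards : List Int), Dom_minimumCardPickup cards → Spec_minimumCardPickup cards (minimumCardPickup cards)

-- ===== LEMMAS AND PROOFS =====

-- A's loop step, named for the proofs (definitionally the lambda inside port A)
def pvStepA (st : Int × PySem.Dict Int Int) (p : Int × Int) : Int × PySem.Dict Int Int :=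
  let ans := st.1
  let pos := st.2
  let ans' :=
    match pos.get? p.2 with
    | some q => if ans = -1 ∨ ans > p.1 - q + 1 then p.1 - q + 1 else ans
    | none => ans
  (ans', pos.insert p.2 p.1)

-- B's inner min step, named for the proofs
def pvStepMin (b : Option Int) (d : Int) : Option Int :=
  match b with
  | none => some d
  | some bb => if d < bb then some d else some bb

-- consecutive gaps of an index list
def pvGaps (L : List Int) : List Int := (L.zip (L.drop 1)).map (fun pr => pr.2 - pr.1 + 1)

-- the indices at which value c occurs in cards
def pvOccs (cards : List Int) (c : Int) : List Int :=
  ((PySem.List.enumerate cards).filter (fun p => p.2 == c)).map (·.1)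

-- the Option-valued minimum B computes
def pvBopt (cards : List Int) : Option Int :=
  (((PySem.List.dedup cards).map (fun c => pvGaps (pvOccs cards c))).flatten).foldl pvStepMin none

def pvToInt (b : Option Int) : Int := b.getD (-1)

def pvOk (b : Option Int) : Prop := ∀ v, b = some v → 2 ≤ v

theorem pvA_eq_fold (cards : List Int) :
    minimumCardPickup cards
      = ((PySem.List.enumerate cards).foldl pvStepA ((-1 : Int), PySem.Dict.empty)).1 := rfl

theorem pvGaps_cons_cons (a b : Int) (t : List Int) :
    pvGaps (a :: b :: t) = (b - a + 1) :: pvGaps (b :: t) := rfl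

theorem pvStepMin_eq (b : Option Int) (d : Int) :
    pvStepMin b d = some (min (Option.getD b d) d) := by
  rcases b with _ | bb
  · simp [pvStepMin]
  · simp only [pvStepMin, Option.getD_some]
    split_ifs <;> rw [Option.some_inj] <;> omega

theorem pvStepMin_comm (b : Option Int) (d e : Int) :
    pvStepMin (pvStepMin b d) e = pvStepMin (pvStepMin b e) d := by
  rcases b with _ | bb <;> simp only [pvStepMin_eq, Option.getD_some, Option.getD_none] <;>
    rw [Option.some_inj] <;> omega

theorem pvFoldl_stepMin_swap (Q : List Int) (s : Option Int) (g : Int) :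
    Q.foldl pvStepMin (pvStepMin s g) = pvStepMin (Q.foldl pvStepMin s) g := by
  induction Q generalizing s with
  | nil => rfl
  | cons q Q ih => simp only [List.foldl_cons, pvStepMin_comm _ g q, ih]

theorem pvFoldl_stepMin_mid (P Q : List Int) (s : Option Int) (g : Int) :
    (P ++ g :: Q).foldl pvStepMin s = pvStepMin ((P ++ Q).foldl pvStepMin s) g := by
  simp [List.foldl_append, pvFoldl_stepMin_swap]

theorem pvOk_foldl (l : List Int) (s : Option Int) (hs : pvOk s) (hl : ∀ g ∈ l, 2 ≤ g) :
    pvOk (l.foldl pvStepMin s) := by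
  induction l generalizing s with
  | nil => exact hs
  | cons g l ih =>
    refine ih _ ?_ (fun g' hg' => hl g' (List.mem_cons_of_mem _ hg'))
    have h2 : 2 ≤ g := hl g (List.mem_cons_self ..)
    intro v hv
    rcases s with _ | bb
    · simp [pvStepMin] at hv; omega
    · have hbb := hs bb rfl
      simp [pvStepMin] at hv
      split_ifs at hv <;> simp at hv <;> omega

theorem pvGaps_append (L : List Int) (n pp : Int) (h : L.getLast? = some pp) :
    pvGaps (L ++ [n]) = pvGaps L ++ [n - pp + 1] := by
  induction L with
  | nil => simp at h
  | cons a t ih =>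
    cases t with
    | nil => simp at h; subst h; simp [pvGaps]
    | cons b t' =>
      have h' : (b :: t').getLast? = some pp := by simpa using h
      rw [List.cons_append, List.cons_append, pvGaps_cons_cons, pvGaps_cons_cons,
        ← List.cons_append, ih h']
      simp

theorem pvGaps_ge_two (L : List Int) (h : L.Pairwise (· < ·)) : ∀ g ∈ pvGaps L, 2 ≤ g := by
  induction L with
  | nil => simp [pvGaps]
  | cons a t ih =>
    cases t with
    | nil => simp [pvGaps]
    | cons b t' =>
      rw [pvGaps_cons_cons]
      intro g hg
      rcases List.mem_cons.mp hg with h1 | h2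
      · have : a < b := (List.pairwise_cons.mp h).1 b (List.mem_cons_self ..)
        omega
      · exact ih (List.pairwise_cons.mp h).2 g h2

theorem pvAupdate (b : Option Int) (hb : pvOk b) (g : Int) :
    (if pvToInt b = -1 ∨ pvToInt b > g then g else pvToInt b) = pvToInt (pvStepMin b g) := by
  rcases b with _ | bb
  · simp [pvStepMin, pvToInt]
  · have h2 := hb bb rfl
    simp only [pvToInt, pvStepMin_eq, Option.getD_some]
    split_ifs <;> omega

theorem pvOccs_append (cards : List Int) (x c : Int) :
    pvOccs (cards ++ [x]) c
      = pvOccs cards c ++ (if x = c then [(cards.length : Int)] else []) := by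
  simp [pvOccs, PySem.List.enumerate_append, PySem.List.enumerate_cons,
    PySem.List.enumerate_nil, List.filter_append]
  split_ifs <;> simp_all

theorem pvOccs_pairwise (cards : List Int) (c : Int) : (pvOccs cards c).Pairwise (· < ·) := by
  exact List.Pairwise.map _ (fun a b h => h)
    ((PySem.List.pairwise_lt_enumerate cards 0).filter _)

theorem pvOccs_eq_nil_iff (cards : List Int) (c : Int) : pvOccs cards c = [] ↔ c ∉ cards := by
  simp only [pvOccs, List.map_eq_nil_iff, List.filter_eq_nil_iff]
  constructor
  · intro h hc
    obtain ⟨k, hk, hke⟩ := List.mem_iff_getElem.mp hc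
    exact h ((0 + k : Int), c) (by
      rw [PySem.List.mem_enumerate_iff _ _ _]
      exact ⟨k, hk, by rw [hke]⟩) (by simp)
  · intro h p hp hpc
    obtain ⟨k, hk, rfl⟩ := (PySem.List.mem_enumerate_iff _ _ _).mp hp
    simp at hpc
    exact h (hpc ▸ List.getElem_mem hk)

theorem pvBopt_ok (cards : List Int) : pvOk (pvBopt cards) := by
  apply pvOk_foldl _ _ (fun v hv => by simp at hv)
  intro g hg
  obtain ⟨l, hl, hgl⟩ := List.mem_flatten.mp hg
  obtain ⟨c, _, rfl⟩ := List.mem_map.mp hl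
  exact pvGaps_ge_two _ (pvOccs_pairwise cards c) g hgl

theorem pvBopt_append_not_mem (cards : List Int) (x : Int) (hx : x ∉ cards) :
    pvBopt (cards ++ [x]) = pvBopt cards := by
  unfold pvBopt
  have hded : PySem.List.dedup (cards ++ [x]) = PySem.List.dedup cards ++ [x] := by
    simp only [PySem.List.dedup_eq_ofList, PySem.Set.ofList_append_singleton]
    exact PySem.Set.add_of_not_mem (fun h => hx ((PySem.Set.mem_ofList _ _).mp h))
  rw [hded, List.map_append, List.map_singleton]
  have hx0 : pvOccs (cards ++ [x]) x = [(cards.length : Int)] := by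
    rw [pvOccs_append, if_pos rfl, (pvOccs_eq_nil_iff cards x).mpr hx, List.nil_append]
  have hgx : pvGaps (pvOccs (cards ++ [x]) x) = [] := by rw [hx0]; rfl
  rw [hgx]
  have hmap : (PySem.List.dedup cards).map (fun c => pvGaps (pvOccs (cards ++ [x]) c))
      = (PySem.List.dedup cards).map (fun c => pvGaps (pvOccs cards c)) := by
    apply List.map_congr_left
    intro c hc
    have hcx : x ≠ c := fun h => hx (h ▸ ((PySem.Set.mem_ofList _ _).mp
      (by simpa [PySem.List.dedup_eq_ofList] using hc)))
    rw [pvOccs_append, if_neg hcx, List.append_nil]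
  rw [hmap]
  simp

theorem pvBopt_append_mem (cards : List Int) (x pp : Int) (hx : x ∈ cards)
    (hlast : (pvOccs cards x).getLast? = some pp) :
    pvBopt (cards ++ [x]) = pvStepMin (pvBopt cards) ((cards.length : Int) - pp + 1) := by
  have hxd : x ∈ PySem.List.dedup cards := by
    simp only [PySem.List.dedup_eq_ofList]
    exact (PySem.Set.mem_ofList _ _).mpr hx
  have hded : PySem.List.dedup (cards ++ [x]) = PySem.List.dedup cards := by
    simp only [PySem.List.dedup_eq_ofList, PySem.Set.ofList_append_singleton]
    exact PySem.Set.add_of_mem ((PySem.Set.mem_ofList _ _).mpr hx)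
  obtain ⟨K1, K2, hsplit⟩ := List.append_of_mem hxd
  have hnd : (K1 ++ x :: K2).Nodup := by
    rw [← hsplit]
    simp only [PySem.List.dedup_eq_ofList]
    exact PySem.Set.nodup_ofList _
  have hx1 : x ∉ K1 := by
    intro h
    exact (List.disjoint_of_nodup_append hnd) h (List.mem_cons_self ..)
  have hx2 : x ∉ K2 := by
    have := (List.nodup_append.mp hnd).2.1
    exact (List.nodup_cons.mp this).1
  unfold pvBopt
  rw [hded, hsplit, List.map_append, List.map_cons, List.map_append, List.map_cons]
  have hK1 : K1.map (fun c => pvGaps (pvOccs (cards ++ [x]) c))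
      = K1.map (fun c => pvGaps (pvOccs cards c)) := by
    apply List.map_congr_left
    intro c hc
    rw [pvOccs_append, if_neg (fun h => hx1 (by rw [h]; exact hc)), List.append_nil]
  have hK2 : K2.map (fun c => pvGaps (pvOccs (cards ++ [x]) c))
      = K2.map (fun c => pvGaps (pvOccs cards c)) := by
    apply List.map_congr_left
    intro c hc
    rw [pvOccs_append, if_neg (fun h => hx2 (by rw [h]; exact hc)), List.append_nil]
  have hgx : pvGaps (pvOccs (cards ++ [x]) x)
      = pvGaps (pvOccs cards x) ++ [(cards.length : Int) - pp + 1] := by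
    rw [pvOccs_append, if_pos rfl, pvGaps_append _ _ _ hlast]
  rw [hK1, hK2, hgx]
  have hassoc :
      (K1.map (fun c => pvGaps (pvOccs cards c))).flatten
        ++ ((pvGaps (pvOccs cards x) ++ [(cards.length : Int) - pp + 1])
              :: K2.map (fun c => pvGaps (pvOccs cards c))).flatten
      = ((K1.map (fun c => pvGaps (pvOccs cards c))).flatten ++ pvGaps (pvOccs cards x))
          ++ ((cards.length : Int) - pp + 1)
            :: (K2.map (fun c => pvGaps (pvOccs cards c))).flatten := by
    simp [List.flatten_cons]
  rw [List.flatten_append, hassoc, pvFoldl_stepMin_mid]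
  congr 1
  simp [List.flatten_cons, List.append_assoc]

theorem pvMain (cards : List Int) :
    (∀ c, ((PySem.List.enumerate cards).foldl pvStepA ((-1 : Int), PySem.Dict.empty)).2.get? c
            = (pvOccs cards c).getLast?)
    ∧ ((PySem.List.enumerate cards).foldl pvStepA ((-1 : Int), PySem.Dict.empty)).1
        = pvToInt (pvBopt cards) := by
  induction cards using List.reverseRecOn with
  | nil =>
    constructor
    · intro c
      simp [PySem.List.enumerate_nil, pvOccs, PySem.Dict.get?_empty]
    · rfl
  | append_singleton cards x ih =>
    obtain ⟨ihd, iha⟩ := ih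
    rw [PySem.List.enumerate_append]
    simp only [PySem.List.enumerate_cons, PySem.List.enumerate_nil, List.foldl_append,
      List.foldl_cons, List.foldl_nil]
    set st := (PySem.List.enumerate cards).foldl pvStepA ((-1 : Int), PySem.Dict.empty) with hst
    have hdict : ∀ c, (pvStepA st (0 + (cards.length : Int), x)).2.get? c
        = (pvOccs (cards ++ [x]) c).getLast? := by
      intro c
      simp only [pvStepA]
      by_cases hc : c = x
      · subst hc
        rw [PySem.Dict.get?_insert_self, pvOccs_append, if_pos rfl, List.getLast?_concat]
        norm_num
      · rw [PySem.Dict.get?_insert_of_ne _ _ hc, ihd c, pvOccs_append, if_neg (fun h => hc h.symm),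
          List.append_nil]
    refine ⟨hdict, ?_⟩
    by_cases hx : x ∈ cards
    · have hne : pvOccs cards x ≠ [] := by
        rw [Ne, pvOccs_eq_nil_iff]; simpa using hx
      obtain ⟨pp, hpp⟩ : ∃ pp, (pvOccs cards x).getLast? = some pp := by
        cases h : (pvOccs cards x).getLast? with
        | none => exact absurd (List.getLast?_eq_none_iff.mp h) hne
        | some pp => exact ⟨pp, rfl⟩
      have hget := ihd x
      rw [hpp] at hget
      simp only [pvStepA, hget, iha]
      rw [pvAupdate (pvBopt cards) (pvBopt_ok cards),
        pvBopt_append_mem cards x pp hx hpp]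
      norm_num
    · have hget := ihd x
      rw [(pvOccs_eq_nil_iff cards x).mpr hx] at hget
      simp only [List.getLast?_nil] at hget
      simp only [pvStepA, hget, iha]
      rw [pvBopt_append_not_mem cards x hx]

theorem pvAlt_eq (cards : List Int) : minimumCardPickup_alt cards = pvToInt (pvBopt cards) := by
  have hD := PySem.Dict.keys_foldl_modify_key (κ := Int) (ν := List Int)
    (PySem.List.enumerate cards) (fun p => p.2) [] (fun _ p => fun v => v ++ [p.1])
    PySem.Dict.empty
  simp only [PySem.Dict.keys_empty, PySem.Set.update_nil_left, PySem.List.map_snd_enumerate] at hD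
  have hkeys : ((PySem.List.enumerate cards).foldl
      (fun d p => d.modify p.2 [] (· ++ [p.1])) PySem.Dict.empty).keys
      = PySem.List.dedup cards := by
    rw [PySem.List.dedup_eq_ofList]
    exact hD
  have hnodup : ((PySem.List.enumerate cards).foldl
      (fun d p => d.modify p.2 [] (· ++ [p.1])) PySem.Dict.empty).keys.Nodup := by
    rw [hkeys, PySem.List.dedup_eq_ofList]
    exact PySem.Set.nodup_ofList _
  have hgetD : ∀ c, ((PySem.List.enumerate cards).foldl
      (fun d p => d.modify p.2 [] (· ++ [p.1])) PySem.Dict.empty).getD c []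
      = pvOccs cards c := by
    intro c
    have h1 : (PySem.List.enumerate cards).foldl
        (fun d p => d.modify p.2 [] (· ++ [p.1])) PySem.Dict.empty
        = ((PySem.List.enumerate cards).map (fun p => (p.2, p.1))).foldl
            (fun d p => d.modify p.1 [] (· ++ [p.2])) PySem.Dict.empty := by
      rw [List.foldl_map]
    rw [h1, PySem.Dict.getD_foldl_modify_append]
    simp [List.filter_map, List.map_map, pvOccs, Function.comp_def]
  have hvals : ((PySem.List.enumerate cards).foldl
      (fun d p => d.modify p.2 [] (· ++ [p.1])) PySem.Dict.empty).values
      = (PySem.List.dedup cards).map (fun c => pvOccs cards c) := by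
    rw [PySem.Dict.values_eq_map_keys _ hnodup [], hkeys]
    exact List.map_congr_left (fun c _ => hgetD c)
  have hinner : ∀ (b : Option Int) (idxs : List Int),
      (idxs.zip (idxs.drop 1)).foldl
        (fun b pr =>
          let d := pr.2 - pr.1 + 1
          match b with
          | none => some d
          | some bb => if d < bb then some d else some bb) b
      = (pvGaps idxs).foldl pvStepMin b := by
    intro b idxs
    rw [pvGaps, List.foldl_map]
    rfl
  show (match ((PySem.List.enumerate cards).foldl
      (fun d p => d.modify p.2 [] (· ++ [p.1])) PySem.Dict.empty).values.foldl
        (fun (b : Option Int) (idxs : List Int) =>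
          (idxs.zip (idxs.drop 1)).foldl
            (fun b pr =>
              let d := pr.2 - pr.1 + 1
              match b with
              | none => some d
              | some bb => if d < bb then some d else some bb) b) none with
    | none => (-1 : Int)
    | some b => b) = pvToInt (pvBopt cards)
  have houter : ((PySem.List.enumerate cards).foldl
      (fun d p => d.modify p.2 [] (· ++ [p.1])) PySem.Dict.empty).values.foldl
        (fun (b : Option Int) (idxs : List Int) =>
          (idxs.zip (idxs.drop 1)).foldl
            (fun b pr =>
              let d := pr.2 - pr.1 + 1
              match b with
              | none => some d
              | some bb => if d < bb then some d else some bb) b) none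
      = pvBopt cards := by
    simp only [hvals, hinner]
    rw [pvBopt, List.foldl_flatten]
    simp [List.foldl_map]
  rw [houter]
  cases pvBopt cards <;> rfl

-- ===== VERDICT (by name: the statement is the Claim_ definition above) =====
theorem minimumCardPickup_spec : Claim_equal_minimumCardPickup := by
  intro cards _
  show minimumCardPickup cards = minimumCardPickup_alt cards
  rw [pvA_eq_fold, (pvMain cards).2, pvAlt_eq]
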